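-- pv_equiv track=rewrite | github.com/NiallBrickell/trafilatura | trafilatura/core.py | enumerate_now_next
-- ===== SOURCE A (Python) =====
-- def enumerate_now_next(l):
--     l = iter(l)
--     i = 0
--     _now = None
--     _next = None
--     try:
--         _now = next(l)
--         _next = next(l)
--         while True:
--             yield i, (_now, _next)
--             i += 1
--             _now = _next
--             _next = next(l)
--     except StopIteration:
--         if _now is not None:
--             yield i, (_now, None)
-- ===== SOURCE B (Python) =====
-- def enumerate_now_next(l):
--     xs = list(l)
--     for i, pair in enumerate(zip(xs, xs[1:] + [None])):
--         yield i, pair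
-- ===== Notes on version B (the rewrite author's own statement) =====
-- stated objective: idiomatic
-- what changed: Replaces the explicit iterator with next()/StopIteration lookahead state machine by materializing the list and enumerating zip(xs, xs[1:]+[None]).
import Mathlib
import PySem

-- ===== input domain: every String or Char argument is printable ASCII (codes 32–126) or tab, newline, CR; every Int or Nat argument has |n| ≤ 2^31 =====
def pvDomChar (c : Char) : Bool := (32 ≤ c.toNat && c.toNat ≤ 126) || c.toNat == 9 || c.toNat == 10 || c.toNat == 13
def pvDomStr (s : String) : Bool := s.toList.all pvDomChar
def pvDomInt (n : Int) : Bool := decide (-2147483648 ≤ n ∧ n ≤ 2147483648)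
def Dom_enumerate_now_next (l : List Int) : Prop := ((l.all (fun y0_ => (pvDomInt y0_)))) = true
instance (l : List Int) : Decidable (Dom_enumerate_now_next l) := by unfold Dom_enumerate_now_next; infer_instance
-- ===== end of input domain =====

-- B replaces A's next()/StopIteration two-element lookahead state machine by enumerate(zip(xs, xs[1:]+[None])) (idiomatic; same behaviour on int lists, where the trailing-None guard of A is always true).

-- ===== PORT A =====
-- A's while-loop with _now/_next lookahead; on StopIteration with a non-None _now it yields (i, (_now, None)).
-- Elements are Int, so _now (once set) is never None and the final guard always fires.
def enumerateNowNextGo (i : Int) (now : Int) (rest : List Int) : List (Int × (Int × Option Int)) :=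
  match rest with
  | [] => [(i, (now, none))]
  | nxt :: rs => (i, (now, some nxt)) :: enumerateNowNextGo (i + 1) nxt rs

def enumerate_now_next (l : List Int) : List (Int × (Int × Option Int)) :=
  match l with
  | [] => []
  | x :: xs => enumerateNowNextGo 0 x xs

-- ===== PORT B =====
def enumerate_now_next_alt (l : List Int) : List (Int × (Int × Option Int)) :=
  ((l.zip ((l.drop 1).map Option.some ++ [Option.none])).zipIdx).map
    (fun p => ((p.2 : Int), p.1))

-- ===== PRECONDITION & SPEC =====
def Spec_enumerate_now_next (l : List Int) (out : List (Int × (Int × Option Int))) : Prop := out = enumerate_now_next_alt l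
instance (l : List Int) (out : List (Int × (Int × Option Int))) : Decidable (Spec_enumerate_now_next l out) := by unfold Spec_enumerate_now_next; infer_instance

-- ===== CLAIM (what is proved, stated in full; the proofs are below) =====
def Claim_equal_enumerate_now_next : Prop := ∀ (l : List Int), Dom_enumerate_now_next l → Spec_enumerate_now_next l (enumerate_now_next l)

-- ===== LEMMAS AND PROOFS =====
lemma enumerateNowNextGo_eq (xs : List Int) : ∀ (k : ℕ) (x : Int),
    enumerateNowNextGo (k : Int) x xs =
      (((x :: xs).zip ((xs.map Option.some) ++ [Option.none])).zipIdx k).map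
        (fun p => ((p.2 : Int), p.1)) := by
  induction xs with
  | nil => intro k x; simp [enumerateNowNextGo, List.zipIdx]
  | cons y ys ih =>
    intro k x
    have h := ih (k + 1) y
    push_cast at h
    simp [enumerateNowNextGo, List.zip_cons_cons, h]

-- ===== VERDICT (by name: the statement is the Claim_ definition above) =====
theorem enumerate_now_next_spec : Claim_equal_enumerate_now_next := by
  intro l _
  unfold Spec_enumerate_now_next enumerate_now_next enumerate_now_next_alt
  cases l with
  | nil => simp
  | cons x xs =>
    have := enumerateNowNextGo_eq xs 0 x
    simpa [List.drop_one] using this
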